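-- pv_equiv track=rewrite | github.com/ReinisDelvers/School-timetable-algorithm | algorithm.py | has_student_conflict
-- ===== SOURCE A (Python) =====
-- def has_student_conflict(sess, key, schedule):
--     if key not in schedule:
--         return False
--     sset = set(sess['students'])
--     for other in schedule[key]:
--         if sset & set(other['students']):
--             return True
--     return False
-- ===== SOURCE B (Python) =====
-- def has_student_conflict(sess, key, schedule):
--     if key not in schedule:
--         return False
--     combined = set()
--     for other in schedule[key]:
--         combined |= set(other['students'])
--     return bool(set(sess['students']) & combined)
-- ===== Notes on version B (the rewrite author's own statement) =====
-- stated objective: alternative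
-- what changed: Replaces the per-session intersect-with-early-exit loop by an aggregation pass that unions all scheduled students into one set followed by a single intersection test.
-- outside the precondition, e.g. on has_student_conflict({'students': [1]}, 'k', {'k': [{'students': [1]}, {}]}): A returns True, B raises KeyError
import Mathlib
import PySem

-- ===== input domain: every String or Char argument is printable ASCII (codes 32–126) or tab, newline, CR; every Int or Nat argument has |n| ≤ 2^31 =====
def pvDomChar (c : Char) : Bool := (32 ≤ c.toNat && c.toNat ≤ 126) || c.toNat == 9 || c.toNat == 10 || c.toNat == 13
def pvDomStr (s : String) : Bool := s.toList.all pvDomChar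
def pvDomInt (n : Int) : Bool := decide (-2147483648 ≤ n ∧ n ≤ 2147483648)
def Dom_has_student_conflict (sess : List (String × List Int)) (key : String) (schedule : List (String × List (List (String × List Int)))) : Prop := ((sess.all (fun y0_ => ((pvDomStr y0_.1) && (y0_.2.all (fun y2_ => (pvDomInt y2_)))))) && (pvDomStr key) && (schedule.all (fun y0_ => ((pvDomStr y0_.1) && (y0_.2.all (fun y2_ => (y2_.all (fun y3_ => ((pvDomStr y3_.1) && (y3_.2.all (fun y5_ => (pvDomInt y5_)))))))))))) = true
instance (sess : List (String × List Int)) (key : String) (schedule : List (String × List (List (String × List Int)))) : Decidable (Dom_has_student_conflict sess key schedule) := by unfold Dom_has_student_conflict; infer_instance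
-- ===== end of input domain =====

-- B replaces A's per-session intersect-with-early-exit loop by one aggregation pass
-- (union of all scheduled students) followed by a single intersection test (alternative decomposition).


-- shared dict access d['students'] (total via getD; Pre_ guarantees the key is present wherever Python reads it)
def hscStudents (d : List (String × List Int)) : List Int :=
  ((PySem.Dict.mk d).get? "students").getD []

-- ===== PORT A =====
-- the 'for other in schedule[key]: if sset & set(other["students"]): return True' loop
def hscLoop (sset : PySem.Set Int) : List (List (String × List Int)) → Bool
  | [] => false
  | o :: rest =>
      if (PySem.Set.inter sset (PySem.Set.ofList (hscStudents o))).isEmpty then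
        hscLoop sset rest
      else true

def has_student_conflict (sess : List (String × List Int)) (key : String) (schedule : List (String × List (List (String × List Int)))) : Bool :=
  match (PySem.Dict.mk schedule).get? key with
  | none => false
  | some lst =>
      let sset : PySem.Set Int := PySem.Set.ofList (hscStudents sess)
      hscLoop sset lst

-- ===== PORT B =====
def has_student_conflict_alt (sess : List (String × List Int)) (key : String) (schedule : List (String × List (List (String × List Int)))) : Bool :=
  match (PySem.Dict.mk schedule).get? key with
  | none => false
  | some lst =>
      let combined : PySem.Set Int :=
        lst.foldl (fun s o => PySem.Set.union s (hscStudents o)) PySem.Set.empty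
      !(PySem.Set.inter (PySem.Set.ofList (hscStudents sess)) combined).isEmpty

-- ===== PRECONDITION & SPEC =====
-- Pre_ excludes exactly the inputs where one of the Pythons raises KeyError on d['students']:
-- when key is in schedule, sess and every session in schedule[key] must carry the 'students' key
-- (A itself raises there except when an earlier session already intersects — there A returns True
-- but B, which reads every session, raises, so both behaviours are a crash of one program).
def Pre_has_student_conflict (sess : List (String × List Int)) (key : String) (schedule : List (String × List (List (String × List Int)))) : Prop :=
  (((PySem.Dict.mk schedule).get? key).all fun lst =>
    (PySem.Dict.mk sess).contains "students" &&
      lst.all fun o => (PySem.Dict.mk o).contains "students") = true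
instance (sess : List (String × List Int)) (key : String) (schedule : List (String × List (List (String × List Int)))) : Decidable (Pre_has_student_conflict sess key schedule) := by unfold Pre_has_student_conflict; infer_instance

def pvWitness_has_student_conflict : (List (String × List Int)) × String × (List (String × List (List (String × List Int)))) :=
  ([("students", [1, 2])], "k", [("k", [[("students", [2, 3])]])])

def Spec_has_student_conflict (sess : List (String × List Int)) (key : String) (schedule : List (String × List (List (String × List Int)))) (out : Bool) : Prop := out = has_student_conflict_alt sess key schedule
instance (sess : List (String × List Int)) (key : String) (schedule : List (String × List (List (String × List Int)))) (out : Bool) : Decidable (Spec_has_student_conflict sess key schedule out) := by unfold Spec_has_student_conflict; infer_instance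

-- ===== CLAIM (what is proved, stated in full; the proofs are below) =====
def Claim_equal_has_student_conflict : Prop := ∀ (sess : List (String × List Int)) (key : String) (schedule : List (String × List (List (String × List Int)))), Dom_has_student_conflict sess key schedule → Pre_has_student_conflict sess key schedule → Spec_has_student_conflict sess key schedule (has_student_conflict sess key schedule)

-- ===== LEMMAS AND PROOFS =====

-- A's loop hits a nonempty intersection iff some scheduled session shares a student
lemma hscLoop_true_iff (sset : PySem.Set Int) (lst : List (List (String × List Int))) :
    hscLoop sset lst = true ↔ ∃ o ∈ lst, ∃ x ∈ sset, x ∈ hscStudents o := by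
  induction lst with
  | nil => simp [hscLoop]
  | cons o rest ih =>
      simp only [hscLoop]
      by_cases h : (PySem.Set.inter sset (PySem.Set.ofList (hscStudents o))).isEmpty = true
      · rw [if_pos h, ih]
        rw [List.isEmpty_iff] at h
        constructor
        · rintro ⟨o', ho', hx⟩; exact ⟨o', List.mem_cons_of_mem _ ho', hx⟩
        · rintro ⟨o', ho', x, hx, hxo⟩
          rcases List.mem_cons.mp ho' with rfl | ho'
          · exfalso
            have : x ∈ PySem.Set.inter sset (PySem.Set.ofList (hscStudents o')) := by
              rw [PySem.Set.mem_inter]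
              exact ⟨hx, (PySem.Set.mem_ofList _ _).mpr hxo⟩
            simp [h] at this
          · exact ⟨o', ho', x, hx, hxo⟩
      · rw [if_neg h]
        simp only [true_iff]
        rcases List.isEmpty_eq_false_iff_exists_mem.mp (Bool.eq_false_iff.mpr h) with ⟨x, hx⟩
        rw [PySem.Set.mem_inter] at hx
        exact ⟨o, List.mem_cons_self, x, hx.1, (PySem.Set.mem_ofList _ _).mp hx.2⟩

-- membership in B's accumulated union
lemma mem_hsc_union_foldl (lst : List (List (String × List Int))) (init : PySem.Set Int) (y : Int) :
    y ∈ lst.foldl (fun s o => PySem.Set.union s (hscStudents o)) init ↔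
      y ∈ init ∨ ∃ o ∈ lst, y ∈ hscStudents o := by
  induction lst generalizing init with
  | nil => simp
  | cons o rest ih =>
      simp only [List.foldl_cons, ih, PySem.Set.mem_union]
      constructor
      · rintro (⟨h | h⟩ | ⟨o', ho', h⟩)
        · exact Or.inl h
        · exact Or.inr ⟨o, List.mem_cons_self, h⟩
        · exact Or.inr ⟨o', List.mem_cons_of_mem _ ho', h⟩
      · rintro (h | ⟨o', ho', h⟩)
        · exact Or.inl (Or.inl h)
        · rcases List.mem_cons.mp ho' with rfl | ho'
          · exact Or.inl (Or.inr h)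
          · exact Or.inr ⟨o', ho', h⟩

-- ===== VERDICT (by name: the statement is the Claim_ definition above) =====
theorem has_student_conflict_spec : Claim_equal_has_student_conflict := by
  intro sess key schedule _ _
  unfold Spec_has_student_conflict has_student_conflict has_student_conflict_alt
  cases h : (PySem.Dict.mk schedule).get? key with
  | none => rfl
  | some lst =>
      simp only []
      rw [← Bool.coe_iff_coe, hscLoop_true_iff]
      rw [Bool.not_eq_eq_eq_not, Bool.not_true, List.isEmpty_eq_false_iff_exists_mem]
      constructor
      · rintro ⟨o, ho, x, hx, hxo⟩
        refine ⟨x, ?_⟩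
        rw [PySem.Set.mem_inter]
        exact ⟨hx, (mem_hsc_union_foldl _ _ _).mpr (Or.inr ⟨o, ho, hxo⟩)⟩
      · rintro ⟨x, hx⟩
        rw [PySem.Set.mem_inter, mem_hsc_union_foldl] at hx
        rcases hx with ⟨hxs, h' | ⟨o, ho, hxo⟩⟩
        · simp [PySem.Set.empty] at h'
        · exact ⟨o, ho, x, hxs, hxo⟩
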